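-- pv_equiv track=rewrite | github.com/varunkudva/python101 | dynamic_programming/coinChange.py | coin_change_dp_2
-- ===== SOURCE A (Python) =====
-- def coin_change_dp_2(change, denominations):
--     dp = [0] * (change+1)
--     dp[0] = 1
--     for i in range(1, change+1):
--         for j in range(len(denominations)):
--             if denominations[j] <= i:
--                 dp[i] += dp[i-denominations[j]]
--     return dp[change]
-- ===== SOURCE B (Python) =====
-- def coin_change_dp_2(change, denominations):
--     # Top-down: memoized recursion on the remaining amount (ordered compositions).
--     cache = {}
--
--     def ways(n):
--         if n == 0:
--             return 1
--         if n not in cache: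
--             cache[n] = sum(ways(n - d) for d in denominations if 0 < d <= n)
--         return cache[n]
--
--     return ways(change)
-- ===== Notes on version B (the rewrite author's own statement) =====
-- stated objective: alternative
-- what changed: replaces A's bottom-up DP table filled by nested index loops with a top-down memoized recursion ways(n) over the remaining amount, with a dict cache and no table at all
-- outside the precondition, e.g. on coin_change_dp_2(5, [1, 0]): A returns 32, B returns 1
import Mathlib
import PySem

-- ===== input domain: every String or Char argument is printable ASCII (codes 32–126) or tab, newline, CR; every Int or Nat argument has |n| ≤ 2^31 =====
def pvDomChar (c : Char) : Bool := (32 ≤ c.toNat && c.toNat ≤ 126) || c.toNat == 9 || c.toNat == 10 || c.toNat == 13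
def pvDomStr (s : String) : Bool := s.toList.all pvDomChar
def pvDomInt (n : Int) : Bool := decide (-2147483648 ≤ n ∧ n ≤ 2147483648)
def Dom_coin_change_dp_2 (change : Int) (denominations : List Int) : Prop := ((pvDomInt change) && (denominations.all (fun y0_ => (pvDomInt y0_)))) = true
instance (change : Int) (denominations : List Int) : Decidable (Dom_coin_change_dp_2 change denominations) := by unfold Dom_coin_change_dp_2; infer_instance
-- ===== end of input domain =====

-- B replaces A's bottom-up DP table filled by nested index loops with a top-down
-- memoized recursion ways(n) over the remaining amount (objective: alternative);
-- same asymptotic cost, no speed claim.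

-- ===== PORT A =====
def coin_change_dp_2 (change : Int) (denominations : List Int) : Int :=
  let dp : List Int := List.replicate (change + 1).toNat 0        -- dp = [0] * (change+1)
  let dp := PySem.List.pySetD dp 0 1                              -- dp[0] = 1
  let dp := (PySem.List.pyRange 1 (change + 1) 1).foldl           -- for i in range(1, change+1):
    (fun dp i =>
      (PySem.List.pyRange 0 (denominations.length : Int) 1).foldl --   for j in range(len(denominations)):
        (fun dp j =>
          if PySem.List.pyGetD denominations j 0 ≤ i then         --     if denominations[j] <= i:
            PySem.List.pySetD dp i                                --       dp[i] += dp[i - denominations[j]]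
              (PySem.List.pyGetD dp i 0 +
               PySem.List.pyGetD dp (i - PySem.List.pyGetD denominations j 0) 0)
          else dp)
        dp)
    dp
  PySem.List.pyGetD dp change 0                                   -- return dp[change]

-- ===== PORT B =====
-- Source B's helper ways(n) with its dict cache threaded through explicitly:
-- return 1 at n = 0; on a cache hit return the cached value; otherwise sum
-- ways(n - d) over the denominations d with 0 < d <= n (the cache flowing
-- left to right through the sum, as Python's generator mutates it), store
-- the sum under n and return it.  The fuel argument is only a totality
-- guard: each recursive call strictly decreases the amount, so the top
-- call's change.toNat + 1 never runs out on the admitted inputs.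
def ccWaysM (ds : List Int) : Nat → PySem.Dict Int Int → Int → PySem.Dict Int Int × Int
  | 0, cache, _ => (cache, 0)
  | fuel + 1, cache, n =>
    if n = 0 then (cache, 1)
    else
      match cache.get? n with
      | some v => (cache, v)
      | none =>
        let p := (ds.filter (fun d => decide (0 < d ∧ d ≤ n))).foldl
          (fun (acc : PySem.Dict Int Int × Int) d =>
            ((ccWaysM ds fuel acc.1 (n - d)).1, acc.2 + (ccWaysM ds fuel acc.1 (n - d)).2))
          (cache, 0)
        (p.1.insert n p.2, p.2)

def coin_change_dp_2_alt (change : Int) (denominations : List Int) : Int :=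
  (ccWaysM denominations (change.toNat + 1) PySem.Dict.empty change).2   -- cache = {}; return ways(change)

-- ===== PRECONDITION & SPEC =====
-- Pre_ excludes negative change, on which A raises IndexError, and — when change ≥ 1 —
-- denominations containing a value ≤ 0: a negative denomination makes A raise IndexError,
-- and a denomination of 0 makes the count of compositions infinite, so the finite values
-- both programs return there (A's depends accidentally on the 0's position in the list,
-- B counts the compositions from the positive denominations only) are arbitrary and
-- neither is the one a specification would pick.
def Pre_coin_change_dp_2 (change : Int) (denominations : List Int) : Prop :=
  0 ≤ change ∧ (change = 0 ∨ ∀ d ∈ denominations, 1 ≤ d)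
instance (change : Int) (denominations : List Int) : Decidable (Pre_coin_change_dp_2 change denominations) := by unfold Pre_coin_change_dp_2; infer_instance

def pvWitness_coin_change_dp_2 : Int × List Int := (5, [1, 2])

def Spec_coin_change_dp_2 (change : Int) (denominations : List Int) (out : Int) : Prop := out = coin_change_dp_2_alt change denominations
instance (change : Int) (denominations : List Int) (out : Int) : Decidable (Spec_coin_change_dp_2 change denominations out) := by unfold Spec_coin_change_dp_2; infer_instance

-- ===== CLAIM (what is proved, stated in full; the proofs are below) =====
def Claim_equal_coin_change_dp_2 : Prop := ∀ (change : Int) (denominations : List Int), Dom_coin_change_dp_2 change denominations → Pre_coin_change_dp_2 change denominations → Spec_coin_change_dp_2 change denominations (coin_change_dp_2 change denominations)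

-- ===== LEMMAS AND PROOFS =====

-- The pure function Source B's ways computes (memoization dropped): the proofs
-- first show ccWaysM returns its values, then relate it to A's table.
def ccWays (ds : List Int) (n : Int) : Int :=
  if n = 0 then 1
  else ((ds.filter (fun d => decide (0 < d ∧ d ≤ n))).attach.map
        (fun x => ccWays ds (n - x.1))).sum
termination_by n.toNat
decreasing_by
  have hx := List.mem_filter.mp x.2
  simp only [decide_eq_true_eq] at hx
  omega

-- A cache is good when every stored value is the corresponding ccWays value.
def ccGood (ds : List Int) (c : PySem.Dict Int Int) : Prop :=
  ∀ m v, c.get? m = some v → v = ccWays ds m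

theorem ccGood_empty (ds : List Int) : ccGood ds PySem.Dict.empty := by
  intro m v h
  simp [PySem.Dict.get?_empty] at h

-- ccWays at a nonzero amount, with the .attach removed.
theorem ccWays_pos (ds : List Int) (n : Int) (hn : n ≠ 0) :
    ccWays ds n
    = ((ds.filter (fun d => decide (0 < d ∧ d ≤ n))).map (fun d => ccWays ds (n - d))).sum := by
  rw [ccWays, if_neg hn]
  rw [show (fun (x : {d // d ∈ ds.filter (fun d => decide (0 < d ∧ d ≤ n))}) =>
        ccWays ds (n - x.1)) = (fun d => ccWays ds (n - d)) ∘ Subtype.val from rfl,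
      ← List.map_map, List.attach_map_subtype_val]

-- The fold inside ccWaysM: threading a good cache adds the ccWays values.
theorem ccWaysM_foldl (ds : List Int) (n : Int) (fuel : Nat)
    (IH : ∀ m : Int, m.toNat < fuel → ∀ c, ccGood ds c →
      ccGood ds (ccWaysM ds fuel c m).1 ∧ (ccWaysM ds fuel c m).2 = ccWays ds m) :
    ∀ (l : List Int), (∀ d ∈ l, (n - d).toNat < fuel) →
    ∀ (c : PySem.Dict Int Int) (s : Int), ccGood ds c →
    ccGood ds ((l.foldl
        (fun (acc : PySem.Dict Int Int × Int) d =>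
          ((ccWaysM ds fuel acc.1 (n - d)).1, acc.2 + (ccWaysM ds fuel acc.1 (n - d)).2))
        (c, s)).1)
    ∧ (l.foldl
        (fun (acc : PySem.Dict Int Int × Int) d =>
          ((ccWaysM ds fuel acc.1 (n - d)).1, acc.2 + (ccWaysM ds fuel acc.1 (n - d)).2))
        (c, s)).2
      = s + (l.map (fun d => ccWays ds (n - d))).sum := by
  intro l
  induction l with
  | nil =>
    intro _ c s hc
    exact ⟨hc, by simp⟩
  | cons x l ihl =>
    intro hb c s hc
    have hx := IH (n - x) (hb x (by simp)) c hc
    have := ihl (fun y hy => hb y (by simp [hy]))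
      (ccWaysM ds fuel c (n - x)).1 (s + (ccWaysM ds fuel c (n - x)).2) hx.1
    refine ⟨this.1, ?_⟩
    rw [List.foldl_cons]
    rw [this.2, hx.2]
    simp [add_assoc]

-- With enough fuel, ccWaysM computes ccWays and keeps the cache good.
theorem ccWaysM_correct (ds : List Int) : ∀ (fuel : Nat) (n : Int), n.toNat < fuel →
    ∀ (c : PySem.Dict Int Int), ccGood ds c →
    ccGood ds (ccWaysM ds fuel c n).1 ∧ (ccWaysM ds fuel c n).2 = ccWays ds n := by
  intro fuel
  induction fuel with
  | zero => intro n hn; omega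
  | succ N ihN =>
    intro n hn c hc
    rw [ccWaysM]
    by_cases h0 : n = 0
    · subst h0
      refine ⟨by simpa using hc, ?_⟩
      rw [ccWays]
      simp
    · rw [if_neg h0]
      cases hget : c.get? n with
      | some v =>
        exact ⟨hc, hc n v hget⟩
      | none =>
        have hb : ∀ d ∈ ds.filter (fun d => decide (0 < d ∧ d ≤ n)),
            (n - d).toNat < N := by
          intro d hd
          have hx := List.mem_filter.mp hd
          simp only [decide_eq_true_eq] at hx
          omega
        have hf := ccWaysM_foldl ds n N ihN
          (ds.filter (fun d => decide (0 < d ∧ d ≤ n))) hb c 0 hc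
        have hval : ((ds.filter (fun d => decide (0 < d ∧ d ≤ n))).map
            (fun d => ccWays ds (n - d))).sum = ccWays ds n :=
          (ccWays_pos ds n h0).symm
        constructor
        · intro m v hmv
          rw [PySem.Dict.get?_insert] at hmv
          by_cases hm : m = n
          · subst hm
            rw [if_pos rfl] at hmv
            have := hf.2
            rw [zero_add, hval] at this
            cases hmv
            exact this
          · rw [if_neg hm] at hmv
            exact hf.1 m v hmv
        · have := hf.2
          rw [zero_add, hval] at this
          exact this

-- ccWays at a nonzero amount-- A characterisation of the values A's dp table holds (used only by the proofs):
-- the per-amount count and the table of counts for the amounts 0..k.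
def ccStep (ds : List Int) (t : List Int) : Int :=
  ((ds.filter (fun d => d ≤ (t.length : Int))).map
    (fun d => PySem.List.pyGetD t (-d) 0)).sum

def ccTab (ds : List Int) : Nat → List Int
  | 0 => [1]
  | k + 1 => ccTab ds k ++ [ccStep ds (ccTab ds k)]

theorem ccTab_length (ds : List Int) (k : Nat) : (ccTab ds k).length = k + 1 := by
  induction k with
  | zero => rfl
  | succ k ih => simp [ccTab, ih]

-- Under positive denominations, ccTab is the table of ccWays values.
theorem ccTab_eq_map (ds : List Int) (hds : ∀ d ∈ ds, 1 ≤ d) (k : Nat) :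
    ccTab ds k = (List.range (k+1)).map (fun i : Nat => ccWays ds (i : Int)) := by
  induction k with
  | zero =>
    have h1 : ccWays ds (0 : Int) = 1 := by rw [ccWays]; norm_num
    simp [ccTab, h1]
  | succ k ih =>
    rw [ccTab, ih, List.range_succ (n := k+1), List.map_append]
    congr 1
    rw [List.map_singleton]
    congr 1
    have hlen : (((List.range (k+1)).map (fun i : Nat => ccWays ds (i : Int))).length : Int)
        = (k : Int) + 1 := by simp
    unfold ccStep
    rw [hlen, ccWays_pos ds (((k+1:Nat)) : Int) (by push_cast; omega)]
    rw [List.filter_congr (l := ds)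
      (q := fun d => decide (0 < d ∧ d ≤ (((k+1:Nat)) : Int)))
      (by intro d hd; have := hds d hd; push_cast; simp; omega)]
    apply congrArg
    apply List.map_congr_left
    intro d hm
    have hd1 : (1:Int) ≤ d := hds d (List.mem_of_mem_filter hm)
    have hdle : d ≤ ((k+1:Nat) : Int) := by
      have := List.of_mem_filter hm
      simp at this
      push_cast
      omega
    have hdle' : d ≤ (k : Int) + 1 := by push_cast at hdle; omega
    rw [show (-d) = -((d.toNat : Nat) : Int) by omega,
        PySem.List.pyGetD_neg_natCast _ d.toNat 0 (by omega) (by simp; omega)]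
    rw [List.getElem_map, List.getElem_range]
    congr 1
    simp only [List.length_map, List.length_range]
    push_cast
    omega

-- A's inner loop, rewritten as a fold over the denominations, sets dp[i] to its old value
-- plus the sum of dp[i-d] over the admissible denominations.
theorem inner_spec (i : Int) (hi1 : 1 ≤ i) :
    ∀ (ds : List Int), (∀ d ∈ ds, 1 ≤ d) → ∀ (dp : List Int), i < (dp.length : Int) →
    ds.foldl
      (fun dp d =>
        if d ≤ i then
          PySem.List.pySetD dp i
            (PySem.List.pyGetD dp i 0 + PySem.List.pyGetD dp (i - d) 0)
        else dp)
      dp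
    = PySem.List.pySetD dp i
        (PySem.List.pyGetD dp i 0 +
         ((ds.filter (fun d => d ≤ i)).map (fun d => PySem.List.pyGetD dp (i - d) 0)).sum) := by
  intro ds
  induction ds with
  | nil =>
    intro _ dp hlen
    have h0 : (0:Int) ≤ i := by omega
    have hn : i.toNat < dp.length := by omega
    simp [PySem.List.pySetD_of_nonneg dp _ h0,
          PySem.List.pyGetD_eq_getElem dp 0 h0 hlen, List.set_getElem_self]
  | cons d ds ih =>
    intro hds dp hlen
    have h0 : (0:Int) ≤ i := by omega
    have hn : i.toNat < dp.length := by omega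
    by_cases hd : d ≤ i
    · have hd1 : (1:Int) ≤ d := hds d (by simp)
      have h0d : (0:Int) ≤ i - d := by omega
      have hdlen : i - d < (dp.length : Int) := by omega
      rw [List.foldl_cons, if_pos hd]
      have hveq : PySem.List.pySetD dp i
          (PySem.List.pyGetD dp i 0 + PySem.List.pyGetD dp (i - d) 0)
          = dp.set i.toNat (PySem.List.pyGetD dp i 0 + PySem.List.pyGetD dp (i - d) 0) :=
        PySem.List.pySetD_of_nonneg dp _ h0
      set v := PySem.List.pyGetD dp i 0 + PySem.List.pyGetD dp (i - d) 0 with hv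
      have hlen' : ((dp.set i.toNat v).length : Int) = (dp.length : Int) := by simp
      rw [hveq, ih (fun d' hm => hds d' (by simp [hm])) (dp.set i.toNat v) (by rw [hlen']; exact hlen)]
      have hget_i : PySem.List.pyGetD (dp.set i.toNat v) i 0 = v := by
        rw [PySem.List.pyGetD_eq_getElem _ 0 h0 (by rw [hlen']; exact hlen)]
        exact List.getElem_set_self (by simpa using hn)
      have hsum : ((ds.filter (fun d' => d' ≤ i)).map
            (fun d' => PySem.List.pyGetD (dp.set i.toNat v) (i - d') 0)).sum
          = ((ds.filter (fun d' => d' ≤ i)).map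
            (fun d' => PySem.List.pyGetD dp (i - d') 0)).sum := by
        apply congrArg
        apply List.map_congr_left
        intro d' hm
        have hd'le : d' ≤ i := by simpa using List.of_mem_filter hm
        have hd'1 : (1:Int) ≤ d' := hds d' (by simp [List.mem_of_mem_filter hm])
        have h0' : (0:Int) ≤ i - d' := by omega
        have hlt' : i - d' < ((dp.set i.toNat v).length : Int) := by rw [hlen']; omega
        rw [PySem.List.pyGetD_eq_getElem _ 0 h0' hlt',
            PySem.List.pyGetD_eq_getElem dp 0 h0' (by omega)]
        exact List.getElem_set_ne (by omega) _
      rw [hsum, hget_i]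
      rw [PySem.List.pySetD_of_nonneg _ _ h0, PySem.List.pySetD_of_nonneg dp _ h0, List.set_set]
      have hfil : (d :: ds).filter (fun d' => d' ≤ i) = d :: ds.filter (fun d' => d' ≤ i) := by
        simp [hd]
      rw [hfil]
      simp [hv, add_assoc]
    · have hfil : (d :: ds).filter (fun d' => d' ≤ i) = ds.filter (fun d' => d' ≤ i) := by
        simp [hd]
      simp only [List.foldl_cons, if_neg hd, hfil]
      exact ih (fun d' hm => hds d' (by simp [hm])) dp hlen

-- One outer iteration of A, applied to the counts table padded with zeros, appends the next count.
theorem step_append (ds : List Int) (hds : ∀ d ∈ ds, 1 ≤ d) (k m : Nat) (hm : 1 ≤ m)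
    (A : List Int) (hA : A.length = k + 1) :
    PySem.List.pySetD (A ++ List.replicate m 0) ((k:Int)+1)
      (PySem.List.pyGetD (A ++ List.replicate m 0) ((k:Int)+1) 0 +
       ((ds.filter (fun d => d ≤ (k:Int)+1)).map
         (fun d => PySem.List.pyGetD (A ++ List.replicate m 0) (((k:Int)+1) - d) 0)).sum)
    = (A ++ [ccStep ds A]) ++ List.replicate (m-1) 0 := by
  have hlen : ((A ++ List.replicate m (0:Int)).length : Int) = (k:Int) + 1 + m := by
    simp [hA]
  have hget0 : PySem.List.pyGetD (A ++ List.replicate m (0:Int)) ((k:Int)+1) 0 = 0 := by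
    rw [PySem.List.pyGetD_eq_getElem _ 0 (by omega) (by omega)]
    rw [List.getElem_append_right (by omega)]
    simp
  have hsum : ((ds.filter (fun d => d ≤ (k:Int)+1)).map
        (fun d => PySem.List.pyGetD (A ++ List.replicate m (0:Int)) (((k:Int)+1) - d) 0)).sum
      = ccStep ds A := by
    unfold ccStep
    rw [hA, show (((k+1:Nat)) : Int) = (k:Int)+1 by push_cast; ring]
    apply congrArg
    apply List.map_congr_left
    intro d hm'
    have hdle : d ≤ (k:Int)+1 := by simpa using List.of_mem_filter hm'
    have hd1 : (1:Int) ≤ d := hds d (List.mem_of_mem_filter hm')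
    rw [show (-d) = -((d.toNat : Nat) : Int) by omega,
        PySem.List.pyGetD_neg_natCast A d.toNat 0 (by omega) (by omega),
        PySem.List.pyGetD_eq_getElem _ 0 (by omega) (by omega)]
    rw [List.getElem_append_left (by omega)]
    simp only [show (((k:Int)+1) - d).toNat = A.length - d.toNat by omega]
  rw [hget0, hsum, zero_add]
  rw [PySem.List.pySetD_of_nonneg _ _ (by omega),
      List.set_append_right _ _ (by omega)]
  have hrep : List.replicate m (0:Int) = 0 :: List.replicate (m-1) 0 := by
    rw [show m = (m-1)+1 by omega]
    simp [List.replicate_succ]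
  rw [hrep, show ((k:Int)+1).toNat - A.length = 0 by omega, List.set_cons_zero]
  simp

-- A's outer loop invariant: after the amounts 1..k the dp table is the counts table padded with zeros.
theorem outer_invariant (ds : List Int) (hds : ∀ d ∈ ds, 1 ≤ d) (ct : Nat) :
    ∀ (k : Nat), k ≤ ct →
    (PySem.List.pyRange 1 ((k : Int) + 1) 1).foldl
      (fun dp i =>
        (PySem.List.pyRange 0 (ds.length : Int) 1).foldl
          (fun dp j =>
            if PySem.List.pyGetD ds j 0 ≤ i then
              PySem.List.pySetD dp i
                (PySem.List.pyGetD dp i 0 +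
                 PySem.List.pyGetD dp (i - PySem.List.pyGetD ds j 0) 0)
            else dp)
          dp)
      (1 :: List.replicate ct 0)
    = ccTab ds k ++ List.replicate (ct - k) 0 := by
  intro k
  induction k with
  | zero =>
    intro _
    rw [PySem.List.pyRange_one_eq_nil (a := 1) (by omega)]
    simp [ccTab]
  | succ k ih =>
    intro hk
    have hk' : k ≤ ct := by omega
    rw [show ((((k+1):Nat) : Int) + 1) = ((k:Int) + 1) + 1 by push_cast; ring,
        PySem.List.pyRange_one_succ_right (by omega), List.foldl_append, ih hk',
        List.foldl_cons, List.foldl_nil]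
    rw [PySem.List.foldl_pyRange_zero_pyGetD' ds 0
      (fun dp d =>
        if d ≤ (k:Int) + 1 then
          PySem.List.pySetD dp ((k:Int) + 1)
            (PySem.List.pyGetD dp ((k:Int) + 1) 0 + PySem.List.pyGetD dp (((k:Int) + 1) - d) 0)
        else dp)]
    rw [inner_spec ((k:Int)+1) (by omega) ds hds _
        (by simp [ccTab_length ds k]; omega)]
    rw [step_append ds hds k (ct - k) (by omega) (ccTab ds k) (ccTab_length ds k)]
    rw [show ct - k - 1 = ct - (k+1) from by omega]
    simp [ccTab]

-- ===== VERDICT (by name: the statement is the Claim_ definition above) =====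
theorem coin_change_dp_2_spec : Claim_equal_coin_change_dp_2 := by
  intro change ds _ hpre
  obtain ⟨h0, hca⟩ := hpre
  unfold Spec_coin_change_dp_2
  have halt : coin_change_dp_2_alt change ds = ccWays ds change := by
    unfold coin_change_dp_2_alt
    exact (ccWaysM_correct ds (change.toNat + 1) change (by omega)
      PySem.Dict.empty (ccGood_empty ds)).2
  rw [halt]
  rcases hca with hc0 | hds
  · subst hc0
    rw [show ccWays ds 0 = 1 from by rw [ccWays]; norm_num]
    rfl
  · have hchange : change = (change.toNat : Int) := by omega
    rw [hchange]
    set ct := change.toNat with hct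
    unfold coin_change_dp_2
    dsimp only
    rw [show ((ct:Int) + 1).toNat = ct + 1 from by omega, List.replicate_succ,
        PySem.List.pySetD_of_nonneg _ _ (by omega),
        show Int.toNat 0 = 0 from rfl, List.set_cons_zero]
    have := outer_invariant ds hds ct ct (le_refl ct)
    rw [this, Nat.sub_self, List.replicate_zero, List.append_nil]
    rw [ccTab_eq_map ds hds ct]
    rw [PySem.List.pyGetD_eq_getElem _ 0 (by omega) (by simp)]
    simp only [Int.toNat_natCast, List.getElem_map, List.getElem_range]
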